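-- pv_equiv track=rewrite | github.com/dongmumu815-ctrl/acwl-ai-platform | DataAInsint/backend/app/middleware/auth_middleware.py | should_authenticate
-- ===== SOURCE A (Python) =====
-- def should_authenticate(path: str) -> bool:
--     """判断路径是否需要认证"""
--     # 不需要认证的路径
--     public_paths = [
--         "/",
--         "/api/auth/login",
--         "/docs",
--         "/redoc",
--         "/openapi.json"
--     ]
--
--     # 静态文件不需要认证
--     if path.startswith("/assets/") or path.endswith(".html") or path.endswith(".js") or path.endswith(".css"):
--         return False
--
--     # 检查是否在公开路径中
--     for public_path in public_paths:
--         if path == public_path or path.startswith(public_path):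
--             return False
--
--     # API路径需要认证（除了登录接口）
--     if path.startswith("/api/"):
--         return True
--
--     return False
-- ===== SOURCE B (Python) =====
-- def should_authenticate(path: str) -> bool:
--     """判断路径是否需要认证.
--
--     A's only `return True` branch is unreachable: it requires path to start
--     with "/api/", but every such path starts with "/" and "/" is in A's
--     public_paths list, so A's loop already returned False. All other inputs
--     fall through A's branches to False as well. Hence the exact closed form:
--     """
--     return False
-- ===== Notes on version B (the rewrite author's own statement) =====
-- stated objective: simpler
-- what changed: A's prefix-matching over a public-paths list is dead code (the root path is itself a public path and every path beginning with a slash matches it, so A's only True branch is unreachable); B is the proven closed form returning False for every input.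
import Mathlib
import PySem

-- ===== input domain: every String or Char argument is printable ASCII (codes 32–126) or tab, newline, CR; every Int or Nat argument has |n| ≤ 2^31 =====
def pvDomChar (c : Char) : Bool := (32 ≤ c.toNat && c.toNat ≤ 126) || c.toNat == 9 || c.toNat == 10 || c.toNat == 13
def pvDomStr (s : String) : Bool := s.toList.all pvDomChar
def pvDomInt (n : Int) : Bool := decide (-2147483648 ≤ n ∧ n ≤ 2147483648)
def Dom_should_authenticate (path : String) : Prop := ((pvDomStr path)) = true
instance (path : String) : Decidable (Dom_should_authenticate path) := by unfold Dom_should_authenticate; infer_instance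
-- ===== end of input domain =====

-- B replaces A's dead prefix-matching logic with the proven closed form `false` (simpler; A's `return True` branch is unreachable because "/" is a public path).

-- ===== PORT A =====
def should_authenticate (path : String) : Bool :=
  -- public_paths, then the static-file check, then the loop (early return → find?), then the /api/ check
  let public_paths : List String := ["/", "/api/auth/login", "/docs", "/redoc", "/openapi.json"]
  if PySem.Str.startswith path "/assets/" || PySem.Str.endswith path ".html"
      || PySem.Str.endswith path ".js" || PySem.Str.endswith path ".css" then
    false
  else
    match public_paths.find? (fun p => path == p || PySem.Str.startswith path p) with
    | some _ => false
    | none => if PySem.Str.startswith path "/api/" then true else false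

-- ===== PORT B =====
def should_authenticate_alt (path : String) : Bool := false

-- ===== PRECONDITION & SPEC =====
def Spec_should_authenticate (path : String) (out : Bool) : Prop := out = should_authenticate_alt path
instance (path : String) (out : Bool) : Decidable (Spec_should_authenticate path out) := by unfold Spec_should_authenticate; infer_instance

-- ===== CLAIM (what is proved, stated in full; the proofs are below) =====
def Claim_equal_should_authenticate : Prop := ∀ (path : String), Dom_should_authenticate path → Spec_should_authenticate path (should_authenticate path)

-- ===== LEMMAS AND PROOFS =====

-- ===== VERDICT (by name: the statement is the Claim_ definition above) =====
theorem should_authenticate_spec : Claim_equal_should_authenticate := by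
  intro path _
  unfold Spec_should_authenticate should_authenticate should_authenticate_alt
  split
  · rfl
  · by_cases h : PySem.Chars.startswith path.toList ['/'] = true
    · simp [List.find?, h]
    · have hapi : PySem.Chars.startswith path.toList ['/', 'a', 'p', 'i', '/'] = false := by
        cases hx : PySem.Chars.startswith path.toList ['/', 'a', 'p', 'i', '/'] with
        | false => rfl
        | true =>
          rw [PySem.Chars.startswith_iff] at hx h
          exact absurd (List.IsPrefix.trans (l₂ := ['/', 'a', 'p', 'i', '/']) (by decide) hx) h
      simp only [List.find?, PySem.Str.startswith_eq]
      split <;> simp [hapi]
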